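-- pv_equiv track=rewrite | github.com/eunjungchoi/algorithm | binary_search/34_find_first_and_last_position_of_element_in_sorted_array.py | get_extreme_index
-- ===== SOURCE A (Python) =====
-- from typing import List
--
-- def get_extreme_index(nums: List[int], target: int, left: bool = True):
--     low = 0
--     high = len(nums)
--
--     while low < high:
--         mid = low + (high - low) // 2
--
--         if target < nums[mid] or (left and target == nums[mid]):  # # mid 기준으로 왼쪽을 서치
--             high = mid
--         else:  # nums[mid] < target  # mid 기준으로 오른쪽을 서치.  mid가 new left가 됨
--             low = mid + 1
--
--     return low
-- ===== SOURCE B (Python) =====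
-- def get_extreme_index(nums, target, left=True):
--     for i, x in enumerate(nums):
--         if (target <= x) if left else (target < x):
--             return i
--     return len(nums)
-- ===== Notes on version B (the rewrite author's own statement) =====
-- stated objective: simpler
-- what changed: Replaces the binary search over [low, high) with a single left-to-right linear scan returning the first index whose element is >= target (left) or > target (right), defaulting to len(nums).
-- outside the precondition, e.g. on get_extreme_index([2, 0, 1], 1, True): A returns 2, B returns 0
import Mathlib
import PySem

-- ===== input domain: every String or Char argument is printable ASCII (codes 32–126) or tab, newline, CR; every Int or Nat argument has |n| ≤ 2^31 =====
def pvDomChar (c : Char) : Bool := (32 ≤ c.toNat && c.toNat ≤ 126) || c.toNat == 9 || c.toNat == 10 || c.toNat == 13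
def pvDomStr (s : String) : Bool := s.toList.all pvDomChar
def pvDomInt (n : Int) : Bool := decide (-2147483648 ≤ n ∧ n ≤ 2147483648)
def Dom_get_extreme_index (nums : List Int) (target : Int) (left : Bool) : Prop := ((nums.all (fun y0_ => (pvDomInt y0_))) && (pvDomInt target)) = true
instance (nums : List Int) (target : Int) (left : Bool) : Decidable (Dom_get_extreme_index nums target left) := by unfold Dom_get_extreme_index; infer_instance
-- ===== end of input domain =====

-- B replaces A's binary search with a left-to-right linear scan for the first index whose
-- element is >= target (left) resp. > target (right); equal to A on sorted input (Pre_).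


-- ===== PORT A =====
-- the while loop; low/high are Nats (0 ≤ low ≤ high ≤ len throughout in Python);
-- nums[mid] with mid < high ≤ len never raises, so getD is exact.
def geiLoop (nums : List Int) (target : Int) (left : Bool) (low high : Nat) : Nat :=
  if _h : low < high then
    let mid := low + (high - low) / 2
    if target < nums.getD mid 0 ∨ (left = true ∧ target = nums.getD mid 0) then
      geiLoop nums target left low mid
    else
      geiLoop nums target left (mid + 1) high
  else
    low
termination_by high - low
decreasing_by all_goals omega

def get_extreme_index (nums : List Int) (target : Int) (left : Bool) : Int :=
  (geiLoop nums target left 0 nums.length : Int)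

-- ===== PORT B =====
-- linear scan: first index i with nums[i] >= target (left) / > target (right), else len
def geiScan (nums : List Int) (target : Int) (left : Bool) (i : Nat) : Nat :=
  match nums with
  | [] => i
  | x :: xs =>
    if (if left then target ≤ x else target < x) then i
    else geiScan xs target left (i + 1)

def get_extreme_index_alt (nums : List Int) (target : Int) (left : Bool) : Int :=
  (geiScan nums target left 0 : Int)

-- ===== PRECONDITION & SPEC =====
-- Pre_ excludes lists that are unsorted around target (an element ≥ target or > target occurring
-- before a smaller one): A is a binary search meant for sorted input, and on such lists the value
-- it returns is an accident of where its midpoint probes happen to land. Any sorted list, and any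
-- list on which target compares uniformly, is admitted.
def Pre_get_extreme_index (nums : List Int) (target : Int) (left : Bool) : Prop :=
  List.Pairwise (fun x y => (target ≤ x → target ≤ y) ∧ (target < x → target < y)) nums
instance (nums : List Int) (target : Int) (left : Bool) : Decidable (Pre_get_extreme_index nums target left) := by unfold Pre_get_extreme_index; infer_instance

def pvWitness_get_extreme_index : List Int × Int × Bool := ([1, 2, 2, 3], 2, true)

def Spec_get_extreme_index (nums : List Int) (target : Int) (left : Bool) (out : Int) : Prop := out = get_extreme_index_alt nums target left
instance (nums : List Int) (target : Int) (left : Bool) (out : Int) : Decidable (Spec_get_extreme_index nums target left out) := by unfold Spec_get_extreme_index; infer_instance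

-- ===== CLAIM (what is proved, stated in full; the proofs are below) =====
def Claim_equal_get_extreme_index : Prop := ∀ (nums : List Int) (target : Int) (left : Bool), Dom_get_extreme_index nums target left → Pre_get_extreme_index nums target left → Spec_get_extreme_index nums target left (get_extreme_index nums target left)

-- ===== LEMMAS AND PROOFS =====

-- the branch predicate both programs test, as a Prop on the element
def geiP (target : Int) (left : Bool) (x : Int) : Prop :=
  if left then target ≤ x else target < x

theorem geiP_iff_cond (target : Int) (left : Bool) (x : Int) :
    geiP target left x ↔ (target < x ∨ (left = true ∧ target = x)) := by
  cases left
  · simp [geiP]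
  · simp [geiP]; omega

-- on a list satisfying Pre_ the predicate is upward closed in the index
theorem geiP_mono {nums : List Int} {target : Int} {left : Bool}
    (hs : List.Pairwise (fun x y => (target ≤ x → target ≤ y) ∧ (target < x → target < y)) nums)
    {j k : Nat} (hjk : j ≤ k) (hk : k < nums.length)
    (h : geiP target left (nums.getD j 0)) : geiP target left (nums.getD k 0) := by
  have hj : j < nums.length := lt_of_le_of_lt hjk hk
  rcases eq_or_lt_of_le hjk with rfl | hlt
  · exact h
  · have hrel := (List.pairwise_iff_getElem.mp hs) j k hj hk hlt
    have hgj : nums.getD j 0 = nums[j] := by simp [List.getD_eq_getElem, hj]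
    have hgk : nums.getD k 0 = nums[k] := by simp [List.getD_eq_getElem, hk]
    rw [hgj] at h; rw [hgk]
    cases left
    · simpa [geiP] using hrel.2 (by simpa [geiP] using h)
    · simpa [geiP] using hrel.1 (by simpa [geiP] using h)

-- the linear scan returns i + (first index in nums satisfying geiP, or its length)
theorem geiScan_props (nums : List Int) (target : Int) (left : Bool) (i : Nat) :
    i ≤ geiScan nums target left i ∧
    geiScan nums target left i ≤ i + nums.length ∧
    (∀ j, i ≤ j → j < geiScan nums target left i → ¬ geiP target left (nums.getD (j - i) 0)) ∧
    (geiScan nums target left i < i + nums.length →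
      geiP target left (nums.getD (geiScan nums target left i - i) 0)) := by
  induction nums generalizing i with
  | nil =>
    refine ⟨le_rfl, by simp [geiScan], fun j h1 h2 => ?_, fun h => absurd h (by simp [geiScan])⟩
    exact absurd h2 (by simp [geiScan]; omega)
  | cons x xs ih =>
    by_cases hx : geiP target left x
    · have hscan : geiScan (x :: xs) target left i = i := by
        simp only [geiScan]; exact if_pos hx
      refine ⟨by omega, by rw [hscan]; omega, ?_, ?_⟩
      · intro j h1 h2; rw [hscan] at h2; omega
      · intro _; rw [hscan]; simpa using hx
    · have hscan : geiScan (x :: xs) target left i = geiScan xs target left (i + 1) := by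
        simp only [geiScan]; exact if_neg hx
      obtain ⟨a1, a2, a3, a4⟩ := ih (i + 1)
      have hl : (x :: xs).length = xs.length + 1 := rfl
      refine ⟨by omega, by rw [hscan]; omega, ?_, ?_⟩
      · intro j hij hj
        rw [hscan] at hj
        rcases Nat.eq_or_lt_of_le hij with rfl | hlt
        · simpa using hx
        · have := a3 j hlt hj
          have hji : j - i = (j - (i + 1)) + 1 := by omega
          rw [hji]
          simpa using this
      · intro hlen
        rw [hscan] at hlen ⊢
        have h4 := a4 (by omega)
        have hji : geiScan xs target left (i + 1) - i
            = (geiScan xs target left (i + 1) - (i + 1)) + 1 := by omega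
        rw [hji]
        simpa using h4

-- the binary search maintains: everything below low fails geiP, everything from high on holds
theorem geiLoop_props (nums : List Int) (target : Int) (left : Bool) :
    ∀ low high : Nat, low ≤ high → high ≤ nums.length →
    (∀ j, j < low → ¬ geiP target left (nums.getD j 0)) →
    (∀ j, high ≤ j → j < nums.length → geiP target left (nums.getD j 0)) →
    List.Pairwise (fun x y => (target ≤ x → target ≤ y) ∧ (target < x → target < y)) nums →
    (geiLoop nums target left low high ≤ nums.length ∧
     (∀ j, j < geiLoop nums target left low high → ¬ geiP target left (nums.getD j 0)) ∧
     (geiLoop nums target left low high < nums.length →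
       geiP target left (nums.getD (geiLoop nums target left low high) 0))) := by
  intro low high
  induction' hfuel : high - low using Nat.strong_induction_on with d ih generalizing low high
  intro hlh hhl hlow hhigh hs
  by_cases h : low < high
  · have hmid : low + (high - low) / 2 < high := by omega
    by_cases hc : target < nums.getD (low + (high - low) / 2) 0 ∨
        (left = true ∧ target = nums.getD (low + (high - low) / 2) 0)
    · have hPmid : geiP target left (nums.getD (low + (high - low) / 2) 0) :=
        (geiP_iff_cond _ _ _).mpr hc
      have hstep : geiLoop nums target left low high
          = geiLoop nums target left low (low + (high - low) / 2) := by
        conv_lhs => rw [geiLoop]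
        simp only [dif_pos h]
        rw [if_pos hc]
      rw [hstep]
      exact ih (low + (high - low) / 2 - low) (by omega) low (low + (high - low) / 2) rfl
        (by omega) (by omega) hlow
        (fun j hj hjlen => geiP_mono hs hj hjlen hPmid) hs
    · have hnPmid : ¬ geiP target left (nums.getD (low + (high - low) / 2) 0) :=
        fun hP => hc ((geiP_iff_cond _ _ _).mp hP)
      have hstep : geiLoop nums target left low high
          = geiLoop nums target left (low + (high - low) / 2 + 1) high := by
        conv_lhs => rw [geiLoop]
        simp only [dif_pos h]
        rw [if_neg hc]
      rw [hstep]
      refine ih (high - (low + (high - low) / 2 + 1)) (by omega)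
        (low + (high - low) / 2 + 1) high rfl (by omega) hhl ?_ hhigh hs
      intro j hj
      rcases Nat.lt_or_ge j low with hjl | hjl
      · exact hlow j hjl
      · exact fun hP => hnPmid (geiP_mono hs (by omega) (by omega) hP)
  · have hstep : geiLoop nums target left low high = low := by
      rw [geiLoop]; rw [dif_neg h]
    rw [hstep]
    exact ⟨by omega, hlow, fun hlt => hhigh low (by omega) hlt⟩

-- ===== VERDICT (by name: the statement is the Claim_ definition above) =====
theorem get_extreme_index_spec : Claim_equal_get_extreme_index := by
  intro nums target left _hdom hpre
  unfold Spec_get_extreme_index get_extreme_index get_extreme_index_alt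
  congr 1
  obtain ⟨b1, b2, b3⟩ := geiLoop_props nums target left 0 nums.length (by omega) le_rfl
    (by omega) (by intro j h1 h2; omega) hpre
  obtain ⟨s1, s2, s3, s4⟩ := geiScan_props nums target left 0
  set r := geiLoop nums target left 0 nums.length
  set s := geiScan nums target left 0
  rcases Nat.lt_trichotomy r s with hlt | heq | hgt
  · exact absurd (b3 (by omega)) (by simpa using s3 r (Nat.zero_le _) hlt)
  · exact heq
  · exact absurd (s4 (by omega)) (by simpa using b2 s hgt)
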